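-- pv_equiv track=rewrite | github.com/z3ntinela/tools | t9_decrypter.py | decrypt_t9
-- ===== SOURCE A (Python) =====
-- t9_dict = {
--     "0":" ",
--     "2": "a",
--     "22": "b",
--     "222": "c",
--     "3": "d",
--     "33": "e",
--     "333": "f",
--     "4": "g",
--     "44": "h",
--     "444": "i",
--     "5": "j",
--     "55": "k",
--     "555": "l",
--     "6": "m",
--     "66": "n",
--     "666": "o",
--     "7": "p",
--     "77": "q",
--     "777": "r",
--     "7777": "s",
--     "8": "t",
--     "88": "u",
--     "888": "v",
--     "9": "w",
--     "99": "x",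
--     "999": "y",
--     "9999": "z"
-- }
--
-- def decrypt_t9(message):
--     letters_list=[]
--     letter_codes = message.strip().split(" ")
--     for letter_code in letter_codes:
--         if letter_code in t9_dict:
--             letters_list.append(t9_dict[letter_code].upper())
--         else:
--             letters_list.append(letter_code)
--     return ''.join(letters_list)
-- ===== SOURCE B (Python) =====
-- KEYPAD = {'2': 'abc', '3': 'def', '4': 'ghi', '5': 'jkl', '6': 'mno',
--           '7': 'pqrs', '8': 'tuv', '9': 'wxyz', '0': ' '}
--
--
-- def _decode(code):
--     if code and all(ch == code[0] for ch in code):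
--         letters = KEYPAD.get(code[0])
--         if letters is not None and len(code) <= len(letters):
--             return letters[len(code) - 1].upper()
--     return code
--
--
-- def decrypt_t9(message):
--     return ''.join(_decode(code) for code in message.strip().split(" "))
-- ===== Notes on version B (the rewrite author's own statement) =====
-- stated objective: idiomatic
-- what changed: Replaces A's hard-coded 27-entry whole-code lookup table by a 9-entry per-digit keypad dict: each code is validated as a run of one digit and decoded by indexing the digit's letter string with the repetition count.
import Mathlib
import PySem

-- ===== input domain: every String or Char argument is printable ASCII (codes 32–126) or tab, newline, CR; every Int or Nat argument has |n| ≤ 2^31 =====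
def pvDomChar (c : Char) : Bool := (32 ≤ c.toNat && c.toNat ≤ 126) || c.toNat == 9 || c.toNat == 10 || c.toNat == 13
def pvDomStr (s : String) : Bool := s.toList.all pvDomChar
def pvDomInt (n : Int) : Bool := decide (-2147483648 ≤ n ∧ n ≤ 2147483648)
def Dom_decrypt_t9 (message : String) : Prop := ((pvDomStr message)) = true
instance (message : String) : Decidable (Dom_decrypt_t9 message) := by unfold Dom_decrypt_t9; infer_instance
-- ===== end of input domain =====

-- B replaces A's 27-entry whole-code lookup table by a 9-entry per-digit keypad table
-- indexed by the repetition count (objective: simpler/idiomatic); same return value everywhere.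

-- ===== PORT A =====
def t9_dict : PySem.Dict String String := PySem.Dict.ofList
  [("0", " "),
   ("2", "a"), ("22", "b"), ("222", "c"),
   ("3", "d"), ("33", "e"), ("333", "f"),
   ("4", "g"), ("44", "h"), ("444", "i"),
   ("5", "j"), ("55", "k"), ("555", "l"),
   ("6", "m"), ("66", "n"), ("666", "o"),
   ("7", "p"), ("77", "q"), ("777", "r"), ("7777", "s"),
   ("8", "t"), ("88", "u"), ("888", "v"),
   ("9", "w"), ("99", "x"), ("999", "y"), ("9999", "z")]

def decrypt_t9 (message : String) : String :=
  let letter_codes : List (List Char) :=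
    PySem.Chars.splitOn (PySem.Chars.strip message.toList) [' ']
  let letters_list : List String :=
    letter_codes.foldl (fun acc lc =>
      match t9_dict.get? (String.ofList lc) with
      | some v => acc ++ [PySem.Str.upper v]
      | none => acc ++ [String.ofList lc]) []
  PySem.Str.join "" letters_list

-- ===== PORT B =====
def pvKeypad : PySem.Dict Char (List Char) := PySem.Dict.ofList
  [('2', "abc".toList), ('3', "def".toList), ('4', "ghi".toList),
   ('5', "jkl".toList), ('6', "mno".toList), ('7', "pqrs".toList),
   ('8', "tuv".toList), ('9', "wxyz".toList), ('0', " ".toList)]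

def pvDecode (code : List Char) : String :=
  match code with
  | [] => String.ofList code
  | d :: _ =>
    if code.all (fun ch => ch == d) then
      match pvKeypad.get? d with
      | some letters =>
        if code.length ≤ letters.length then
          match PySem.List.pyGet? letters ((code.length : Int) - 1) with
          | some c => String.ofList [PySem.Chars.upperChar c]
          | none => String.ofList code   -- unreachable: index is in range
        else String.ofList code
      | none => String.ofList code
    else String.ofList code

def decrypt_t9_alt (message : String) : String :=
  PySem.Str.join ""
    ((PySem.Chars.splitOn (PySem.Chars.strip message.toList) [' ']).map pvDecode)

-- ===== PRECONDITION & SPEC =====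
def Spec_decrypt_t9 (message : String) (out : String) : Prop := out = decrypt_t9_alt message
instance (message : String) (out : String) : Decidable (Spec_decrypt_t9 message out) := by unfold Spec_decrypt_t9; infer_instance

-- ===== CLAIM (what is proved, stated in full; the proofs are below) =====
def Claim_equal_decrypt_t9 : Prop := ∀ (message : String), Dom_decrypt_t9 message → Spec_decrypt_t9 message (decrypt_t9 message)

-- ===== LEMMAS AND PROOFS =====

-- A's per-code step, factored out for the proof.
def pvDecodeA (lc : List Char) : String :=
  match t9_dict.get? (String.ofList lc) with
  | some v => PySem.Str.upper v
  | none => String.ofList lc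

-- B's validity test, mirrored as a Bool predicate for case analysis.
def pvValid (cs : List Char) : Bool :=
  match cs with
  | [] => false
  | d :: _ =>
    cs.all (fun ch => ch == d) &&
      (match pvKeypad.get? d with
       | some letters => decide (cs.length ≤ letters.length)
       | none => false)

lemma t9_dict_eq : t9_dict = PySem.Dict.mk
  [("0", " "),
   ("2", "a"), ("22", "b"), ("222", "c"),
   ("3", "d"), ("33", "e"), ("333", "f"),
   ("4", "g"), ("44", "h"), ("444", "i"),
   ("5", "j"), ("55", "k"), ("555", "l"),
   ("6", "m"), ("66", "n"), ("666", "o"),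
   ("7", "p"), ("77", "q"), ("777", "r"), ("7777", "s"),
   ("8", "t"), ("88", "u"), ("888", "v"),
   ("9", "w"), ("99", "x"), ("999", "y"), ("9999", "z")] := rfl

lemma pvKeypad_eq : pvKeypad = PySem.Dict.mk
  [('2', "abc".toList), ('3', "def".toList), ('4', "ghi".toList),
   ('5', "jkl".toList), ('6', "mno".toList), ('7', "pqrs".toList),
   ('8', "tuv".toList), ('9', "wxyz".toList), ('0', " ".toList)] := rfl

lemma pvDecode_of_invalid (cs : List Char) (h : pvValid cs = false) :
    pvDecode cs = String.ofList cs := by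
  cases cs with
  | nil => rfl
  | cons d rest =>
    simp only [pvValid, Bool.and_eq_false_iff] at h
    simp only [pvDecode]
    rcases h with h | h
    · rw [h]; simp
    · cases hk : pvKeypad.get? d with
      | none => simp
      | some letters =>
        rw [hk] at h
        simp only [decide_eq_false_iff_not] at h
        split
        · simp
          intro hlt
          exfalso
          simp at h
          omega
        · rfl

lemma pvGetNone_of_invalid (cs : List Char) (h : pvValid cs = false) :
    t9_dict.get? (String.ofList cs) = none := by
  have key : ∀ s : String, s = String.ofList cs → pvValid s.toList = true → False := by
    intro s hs hv
    have hcs : s.toList = cs := by rw [hs]; simp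
    rw [hcs] at hv
    rw [hv] at h
    exact Bool.noConfusion h
  rw [PySem.Dict.get?_eq_none_iff_not_mem_keys]
  intro hmem
  rw [t9_dict_eq] at hmem
  simp only [PySem.Dict.keys_mk, List.map, List.mem_cons, List.not_mem_nil, or_false] at hmem
  rcases hmem with h|h|h|h|h|h|h|h|h|h|h|h|h|h|h|h|h|h|h|h|h|h|h|h|h|h|h
  all_goals exact key _ h.symm (by decide)

lemma pvDecodeA_eq_pvDecode (cs : List Char) : pvDecodeA cs = pvDecode cs := by
  cases hv : pvValid cs with
  | false =>
    rw [pvDecode_of_invalid cs hv, pvDecodeA, pvGetNone_of_invalid cs hv]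
  | true =>
    cases cs with
    | nil => simp [pvValid] at hv
    | cons d rest =>
      simp only [pvValid, Bool.and_eq_true] at hv
      obtain ⟨hall, hrest⟩ := hv
      have hrep : d :: rest = List.replicate (d :: rest).length d := by
        apply List.eq_replicate_of_mem
        intro b hb
        have := List.all_eq_true.mp hall b hb
        simpa using this
      cases hk : pvKeypad.get? d with
      | none => rw [hk] at hrest; simp at hrest
      | some letters =>
        rw [hk] at hrest
        simp only [decide_eq_true_eq] at hrest
        -- d is one of the nine keypad digits; enumerate it from the literal lookup
        have hd : d = '2' ∨ d = '3' ∨ d = '4' ∨ d = '5' ∨ d = '6' ∨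
                  d = '7' ∨ d = '8' ∨ d = '9' ∨ d = '0' := by
          rw [pvKeypad_eq] at hk
          simp only [PySem.Dict.get?_mk_cons] at hk
          split_ifs at hk with g1 g2 g3 g4 g5 g6 g7 g8 g9
          · exact Or.inl (eq_of_beq g1).symm
          · exact Or.inr (Or.inl (eq_of_beq g2).symm)
          · exact Or.inr (Or.inr (Or.inl (eq_of_beq g3).symm))
          · exact Or.inr (Or.inr (Or.inr (Or.inl (eq_of_beq g4).symm)))
          · exact Or.inr (Or.inr (Or.inr (Or.inr (Or.inl (eq_of_beq g5).symm))))
          · exact Or.inr (Or.inr (Or.inr (Or.inr (Or.inr (Or.inl (eq_of_beq g6).symm)))))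
          · exact Or.inr (Or.inr (Or.inr (Or.inr (Or.inr (Or.inr (Or.inl (eq_of_beq g7).symm))))))
          · exact Or.inr (Or.inr (Or.inr (Or.inr (Or.inr (Or.inr (Or.inr (Or.inl (eq_of_beq g8).symm)))))))
          · exact Or.inr (Or.inr (Or.inr (Or.inr (Or.inr (Or.inr (Or.inr (Or.inr (eq_of_beq g9).symm)))))))
          · exact absurd hk (by simp [PySem.Dict.get?])
        set n := rest.length + 1 with hn
        have hlen : (d :: rest).length = n := by simp [hn]
        rw [hlen] at hrep hrest
        rw [hrep]
        rcases hd with rfl | rfl | rfl | rfl | rfl | rfl | rfl | rfl | rfl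
        · rw [show pvKeypad.get? '2' = some ("abc".toList) from rfl] at hk
          obtain rfl := Option.some_inj.mp hk
          have hb : n ≤ ("abc".toList).length := hrest
          have h1 : 1 ≤ n := by omega
          have h4 : n ≤ 4 := by simp at hb; omega
          interval_cases n <;> decide
        · rw [show pvKeypad.get? '3' = some ("def".toList) from rfl] at hk
          obtain rfl := Option.some_inj.mp hk
          have hb : n ≤ ("def".toList).length := hrest
          have h1 : 1 ≤ n := by omega
          have h4 : n ≤ 4 := by simp at hb; omega
          interval_cases n <;> decide
        · rw [show pvKeypad.get? '4' = some ("ghi".toList) from rfl] at hk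
          obtain rfl := Option.some_inj.mp hk
          have hb : n ≤ ("ghi".toList).length := hrest
          have h1 : 1 ≤ n := by omega
          have h4 : n ≤ 4 := by simp at hb; omega
          interval_cases n <;> decide
        · rw [show pvKeypad.get? '5' = some ("jkl".toList) from rfl] at hk
          obtain rfl := Option.some_inj.mp hk
          have hb : n ≤ ("jkl".toList).length := hrest
          have h1 : 1 ≤ n := by omega
          have h4 : n ≤ 4 := by simp at hb; omega
          interval_cases n <;> decide
        · rw [show pvKeypad.get? '6' = some ("mno".toList) from rfl] at hk
          obtain rfl := Option.some_inj.mp hk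
          have hb : n ≤ ("mno".toList).length := hrest
          have h1 : 1 ≤ n := by omega
          have h4 : n ≤ 4 := by simp at hb; omega
          interval_cases n <;> decide
        · rw [show pvKeypad.get? '7' = some ("pqrs".toList) from rfl] at hk
          obtain rfl := Option.some_inj.mp hk
          have hb : n ≤ ("pqrs".toList).length := hrest
          have h1 : 1 ≤ n := by omega
          have h4 : n ≤ 4 := by simp at hb; omega
          interval_cases n <;> decide
        · rw [show pvKeypad.get? '8' = some ("tuv".toList) from rfl] at hk
          obtain rfl := Option.some_inj.mp hk
          have hb : n ≤ ("tuv".toList).length := hrest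
          have h1 : 1 ≤ n := by omega
          have h4 : n ≤ 4 := by simp at hb; omega
          interval_cases n <;> decide
        · rw [show pvKeypad.get? '9' = some ("wxyz".toList) from rfl] at hk
          obtain rfl := Option.some_inj.mp hk
          have hb : n ≤ ("wxyz".toList).length := hrest
          have h1 : 1 ≤ n := by omega
          have h4 : n ≤ 4 := by simp at hb; omega
          interval_cases n <;> decide
        · rw [show pvKeypad.get? '0' = some (" ".toList) from rfl] at hk
          obtain rfl := Option.some_inj.mp hk
          have hb : n ≤ (" ".toList).length := hrest
          have h1 : 1 ≤ n := by omega
          have h4 : n ≤ 4 := by simp at hb; omega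
          interval_cases n <;> decide

lemma foldl_eq_map_pvDecodeA (l : List (List Char)) :
    l.foldl (fun acc lc =>
      match t9_dict.get? (String.ofList lc) with
      | some v => acc ++ [PySem.Str.upper v]
      | none => acc ++ [String.ofList lc]) [] = l.map pvDecodeA := by
  have hstep : ∀ lc acc, (match t9_dict.get? (String.ofList lc) with
      | some v => acc ++ [PySem.Str.upper v]
      | none => acc ++ [String.ofList lc]) = acc ++ [pvDecodeA lc] := by
    intro lc acc
    unfold pvDecodeA
    cases t9_dict.get? (String.ofList lc) <;> rfl
  calc l.foldl (fun acc lc =>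
      match t9_dict.get? (String.ofList lc) with
      | some v => acc ++ [PySem.Str.upper v]
      | none => acc ++ [String.ofList lc]) []
      = l.foldl (fun acc lc => acc ++ [pvDecodeA lc]) [] := by
        congr 1; funext acc lc; exact hstep lc acc
    _ = l.map pvDecodeA := by
        rw [PySem.List.foldl_append_singleton_eq_map]; simp

-- ===== VERDICT (by name: the statement is the Claim_ definition above) =====
theorem decrypt_t9_spec : Claim_equal_decrypt_t9 := by
  intro message _
  show decrypt_t9 message = decrypt_t9_alt message
  unfold decrypt_t9 decrypt_t9_alt
  simp only [foldl_eq_map_pvDecodeA]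
  congr 1
  exact List.map_congr_left (fun cs _ => pvDecodeA_eq_pvDecode cs)
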